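-- pv_equiv track=rewrite | github.com/Thomas40522/ai_execution_decision | backend/decision.py | map_keywords_to_issues
-- ===== SOURCE A (Python) =====
-- HIGH_RISK_ACTION_KEYWORDS = ["delete", "remove", "send", "share", "transfer"]
--
-- IRREVERSIBLE_ACTION_KEYWORDS = ["delete all", "permanently"]
--
-- AMBIGUOUS_TARGET_KEYWORDS = ["it", "that", "them"]
--
-- CONFLICTING_CONTEXT_KEYWORDS = ["wait", "hold off", "cancel"]
--
-- CONFIRMING_KEYWORDS = ["confirm", "understand", "sure"]
--
-- SPECIFIC_KEYWORDS = ["name", "time"]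
--
-- def map_keywords_to_issues(keywords):
--     keyword_issue_map = {
--         "HIGH_RISK_ACTION": HIGH_RISK_ACTION_KEYWORDS,
--         "IRREVERSIBLE_ACTION": IRREVERSIBLE_ACTION_KEYWORDS,
--         "AMBIGUOUS_TARGET": AMBIGUOUS_TARGET_KEYWORDS,
--         "CONFLICTING_CONTEXT": CONFLICTING_CONTEXT_KEYWORDS,
--         "CONFIRMING": CONFIRMING_KEYWORDS,
--         "SPECIFIC": SPECIFIC_KEYWORDS,
--     }
--
--     issues_from_keywords = []
--
--     for issue, kw_list in keyword_issue_map.items():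
--         for kw in keywords:
--             if kw in kw_list:
--                 issues_from_keywords.append(issue)
--
--     return issues_from_keywords
-- ===== SOURCE B (Python) =====
-- HIGH_RISK_ACTION_KEYWORDS = ["delete", "remove", "send", "share", "transfer"]
-- IRREVERSIBLE_ACTION_KEYWORDS = ["delete all", "permanently"]
-- AMBIGUOUS_TARGET_KEYWORDS = ["it", "that", "them"]
-- CONFLICTING_CONTEXT_KEYWORDS = ["wait", "hold off", "cancel"]
-- CONFIRMING_KEYWORDS = ["confirm", "understand", "sure"]
-- SPECIFIC_KEYWORDS = ["name", "time"]
--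
-- def map_keywords_to_issues(keywords):
--     # single bucketing pass: count hits per category, then emit labels in fixed order
--     h = i = a = c = f = s = 0
--     for kw in keywords:
--         if kw in HIGH_RISK_ACTION_KEYWORDS: h += 1
--         if kw in IRREVERSIBLE_ACTION_KEYWORDS: i += 1
--         if kw in AMBIGUOUS_TARGET_KEYWORDS: a += 1
--         if kw in CONFLICTING_CONTEXT_KEYWORDS: c += 1
--         if kw in CONFIRMING_KEYWORDS: f += 1
--         if kw in SPECIFIC_KEYWORDS: s += 1
--     return (["HIGH_RISK_ACTION"] * h + ["IRREVERSIBLE_ACTION"] * i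
--             + ["AMBIGUOUS_TARGET"] * a + ["CONFLICTING_CONTEXT"] * c
--             + ["CONFIRMING"] * f + ["SPECIFIC"] * s)
-- ===== Notes on version B (the rewrite author's own statement) =====
-- stated objective: alternative
-- what changed: Replaces A's six category-major rescans of the keyword list by a single bucketing pass that counts hits per category, then emits each label count-many times in the fixed category order.
import Mathlib
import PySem

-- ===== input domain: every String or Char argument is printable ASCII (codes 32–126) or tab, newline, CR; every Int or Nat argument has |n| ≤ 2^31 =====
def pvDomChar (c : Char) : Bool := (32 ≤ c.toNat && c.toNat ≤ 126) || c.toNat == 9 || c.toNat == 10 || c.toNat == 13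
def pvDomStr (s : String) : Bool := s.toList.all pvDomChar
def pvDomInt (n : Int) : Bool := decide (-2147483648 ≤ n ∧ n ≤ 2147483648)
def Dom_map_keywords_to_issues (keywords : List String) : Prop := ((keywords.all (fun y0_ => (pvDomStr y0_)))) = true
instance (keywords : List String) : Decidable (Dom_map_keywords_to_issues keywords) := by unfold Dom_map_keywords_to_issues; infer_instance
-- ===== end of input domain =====

-- B replaces A's six category-major rescans by one bucketing pass with per-category counters; alternative decomposition, same result.

-- ===== PORT A =====
def pvHIGH : List String := ["delete", "remove", "send", "share", "transfer"]
def pvIRR : List String := ["delete all", "permanently"]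
def pvAMB : List String := ["it", "that", "them"]
def pvCONF : List String := ["wait", "hold off", "cancel"]
def pvCFM : List String := ["confirm", "understand", "sure"]
def pvSPEC : List String := ["name", "time"]

-- A: dict of issue → list (insertion order), outer loop over items, inner loop over keywords
def map_keywords_to_issues (keywords : List String) : List String :=
  let keywordIssueMap : List (String × List String) :=
    [("HIGH_RISK_ACTION", pvHIGH), ("IRREVERSIBLE_ACTION", pvIRR),
     ("AMBIGUOUS_TARGET", pvAMB), ("CONFLICTING_CONTEXT", pvCONF),
     ("CONFIRMING", pvCFM), ("SPECIFIC", pvSPEC)]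
  keywordIssueMap.foldl
    (fun acc p =>
      keywords.foldl (fun acc2 kw => if kw ∈ p.2 then acc2 ++ [p.1] else acc2) acc)
    []

-- ===== PORT B =====
-- B: one pass over keywords maintaining six counters, then replicate each label
def map_keywords_to_issues_alt (keywords : List String) : List String :=
  let cs : Nat × Nat × Nat × Nat × Nat × Nat :=
    keywords.foldl
      (fun c kw =>
        ((if kw ∈ pvHIGH then c.1 + 1 else c.1),
         (if kw ∈ pvIRR then c.2.1 + 1 else c.2.1),
         (if kw ∈ pvAMB then c.2.2.1 + 1 else c.2.2.1),
         (if kw ∈ pvCONF then c.2.2.2.1 + 1 else c.2.2.2.1),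
         (if kw ∈ pvCFM then c.2.2.2.2.1 + 1 else c.2.2.2.2.1),
         (if kw ∈ pvSPEC then c.2.2.2.2.2 + 1 else c.2.2.2.2.2)))
      (0, 0, 0, 0, 0, 0)
  List.replicate cs.1 "HIGH_RISK_ACTION" ++ List.replicate cs.2.1 "IRREVERSIBLE_ACTION"
    ++ List.replicate cs.2.2.1 "AMBIGUOUS_TARGET" ++ List.replicate cs.2.2.2.1 "CONFLICTING_CONTEXT"
    ++ List.replicate cs.2.2.2.2.1 "CONFIRMING" ++ List.replicate cs.2.2.2.2.2 "SPECIFIC"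

-- ===== PRECONDITION & SPEC =====
def Spec_map_keywords_to_issues (keywords : List String) (out : List String) : Prop := out = map_keywords_to_issues_alt keywords
instance (keywords : List String) (out : List String) : Decidable (Spec_map_keywords_to_issues keywords out) := by unfold Spec_map_keywords_to_issues; infer_instance

-- ===== CLAIM (what is proved, stated in full; the proofs are below) =====
def Claim_equal_map_keywords_to_issues : Prop := ∀ (keywords : List String), Dom_map_keywords_to_issues keywords → Spec_map_keywords_to_issues keywords (map_keywords_to_issues keywords)

-- ===== LEMMAS AND PROOFS =====

-- A's inner loop over keywords appends the label once per matching keyword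
lemma inner_eq_replicate (l : List String) (x : String) (keywords acc : List String) :
    keywords.foldl (fun acc2 kw => if kw ∈ l then acc2 ++ [x] else acc2) acc
      = acc ++ List.replicate (keywords.countP (fun kw => kw ∈ l)) x := by
  induction keywords generalizing acc with
  | nil => simp
  | cons k ks ih =>
    simp only [List.foldl_cons, List.countP_cons]
    by_cases h : k ∈ l
    · simp [h, ih, List.replicate_succ]
    · simp [h, ih]

-- B's counting pass computes the six countP values
lemma counts_eq (keywords : List String) (c : Nat × Nat × Nat × Nat × Nat × Nat) :
    keywords.foldl
      (fun c kw =>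
        ((if kw ∈ pvHIGH then c.1 + 1 else c.1),
         (if kw ∈ pvIRR then c.2.1 + 1 else c.2.1),
         (if kw ∈ pvAMB then c.2.2.1 + 1 else c.2.2.1),
         (if kw ∈ pvCONF then c.2.2.2.1 + 1 else c.2.2.2.1),
         (if kw ∈ pvCFM then c.2.2.2.2.1 + 1 else c.2.2.2.2.1),
         (if kw ∈ pvSPEC then c.2.2.2.2.2 + 1 else c.2.2.2.2.2))) c
    = (c.1 + keywords.countP (fun kw => kw ∈ pvHIGH),
       c.2.1 + keywords.countP (fun kw => kw ∈ pvIRR),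
       c.2.2.1 + keywords.countP (fun kw => kw ∈ pvAMB),
       c.2.2.2.1 + keywords.countP (fun kw => kw ∈ pvCONF),
       c.2.2.2.2.1 + keywords.countP (fun kw => kw ∈ pvCFM),
       c.2.2.2.2.2 + keywords.countP (fun kw => kw ∈ pvSPEC)) := by
  induction keywords generalizing c with
  | nil => simp
  | cons k ks ih =>
    simp only [List.foldl_cons, List.countP_cons, ih]
    simp only [Prod.mk.injEq, decide_eq_true_eq]
    refine ⟨?_, ?_, ?_, ?_, ?_, ?_⟩ <;> split_ifs <;> omega

-- ===== VERDICT (by name: the statement is the Claim_ definition above) =====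
theorem map_keywords_to_issues_spec : Claim_equal_map_keywords_to_issues := by
  intro keywords _
  unfold Spec_map_keywords_to_issues map_keywords_to_issues map_keywords_to_issues_alt
  simp only [List.foldl_cons, List.foldl_nil, inner_eq_replicate, counts_eq]
  simp [List.append_assoc]
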